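-- pv_equiv track=rewrite | github.com/belindachang-lab/mb_prime | hetero_spacer_generator/primer_tools.py | get_cross_iteration_pattern
-- ===== SOURCE A (Python) =====
-- from typing import Any, List, Tuple, Dict, Iterable, Union
--
-- def get_cross_iteration_pattern(num_iter: int) -> List[List[Tuple[int, int]]]:
--     """Returns an iteration pattern that, when performed over a square
--     matrix, ensures that each column and row is iterated over the once number
--     each iteration.
--     Usage:
--     >>> # Some square matrix, below example just shows symmetry of iteration.
--     >>> matrix = [[1, 2, 3],
--     ...           [4, 5, 6],
--     ...           [7, 8, 9]]
--     >>> for iteration in get_cross_iteration_pattern(len(matrix))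
--     ...     total = 0
--     ...     for indices in iteration:
--     ...         total += matrix[indices[0]][indices[1]]
--     ...     assert total == 15
--     """
--     iter_p = []
--     # Get first iteration, straight down the middle.
--     for i in range(num_iter):
--         iter_s = []
--         for j in range(num_iter):
--             k = j + i
--             if k >= num_iter:
--                 k -= num_iter
--             iter_s.append((j, k))
--         iter_p.append(iter_s)
--
--     return iter_p
-- ===== SOURCE B (Python) =====
-- def get_cross_iteration_pattern(num_iter):
--     # Rotating index buffer: enumerate the buffer for each row, then rotate left.
--     base = list(range(num_iter))
--     iter_p = []
--     for _ in range(num_iter):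
--         iter_p.append(list(enumerate(base)))
--         base = base[1:] + base[:1]
--     return iter_p
-- ===== Notes on version B (the rewrite author's own statement) =====
-- stated objective: alternative
-- what changed: Replaces per-cell modular index arithmetic (k=(j+i) adjusted by num_iter) with a rotating index buffer: each row is enumerate(base) and base is rotated left by one between rows.
import Mathlib
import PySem

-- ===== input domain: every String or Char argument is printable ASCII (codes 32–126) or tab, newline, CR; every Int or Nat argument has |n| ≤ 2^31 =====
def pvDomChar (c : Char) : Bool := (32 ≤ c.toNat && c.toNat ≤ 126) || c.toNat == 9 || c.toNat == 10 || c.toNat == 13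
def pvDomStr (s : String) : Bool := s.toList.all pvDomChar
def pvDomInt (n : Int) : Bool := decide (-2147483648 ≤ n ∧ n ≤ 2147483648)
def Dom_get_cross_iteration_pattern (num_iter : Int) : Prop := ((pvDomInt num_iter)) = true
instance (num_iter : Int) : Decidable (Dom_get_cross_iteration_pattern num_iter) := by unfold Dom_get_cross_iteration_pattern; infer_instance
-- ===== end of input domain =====

-- B replaces the per-cell modular arithmetic with a rotating index buffer (alternative decomposition, same cost).

-- ===== PORT A =====
def get_cross_iteration_pattern (num_iter : Int) : List (List (Int × Int)) :=
  (PySem.List.pyRange 0 num_iter 1).foldl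
    (fun iter_p i =>
      iter_p ++ [(PySem.List.pyRange 0 num_iter 1).foldl
        (fun iter_s j =>
          let k := j + i
          let k := if k ≥ num_iter then k - num_iter else k
          iter_s ++ [(j, k)]) []])
    []

-- ===== PORT B =====
def get_cross_iteration_pattern_alt (num_iter : Int) : List (List (Int × Int)) :=
  ((PySem.List.pyRange 0 num_iter 1).foldl
    (fun (st : List Int × List (List (Int × Int))) _ =>
      (st.1.drop 1 ++ st.1.take 1, st.2 ++ [PySem.List.enumerate st.1]))
    (PySem.List.pyRange 0 num_iter 1, [])).2

-- ===== PRECONDITION & SPEC =====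
def Spec_get_cross_iteration_pattern (num_iter : Int) (out : List (List (Int × Int))) : Prop := out = get_cross_iteration_pattern_alt num_iter
instance (num_iter : Int) (out : List (List (Int × Int))) : Decidable (Spec_get_cross_iteration_pattern num_iter out) := by unfold Spec_get_cross_iteration_pattern; infer_instance

-- ===== CLAIM (what is proved, stated in full; the proofs are below) =====
def Claim_equal_get_cross_iteration_pattern : Prop := ∀ (num_iter : Int), Dom_get_cross_iteration_pattern num_iter → Spec_get_cross_iteration_pattern num_iter (get_cross_iteration_pattern num_iter)

-- ===== LEMMAS AND PROOFS =====

-- left rotation by one, B's buffer update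
def pvRot (xs : List Int) : List Int := xs.drop 1 ++ xs.take 1

-- B's fold, unrolled: the t-th appended row is enumerate of the t-times rotated buffer
theorem pv_bfold (l : List Int) (base : List Int) (acc : List (List (Int × Int))) :
    (l.foldl
      (fun (st : List Int × List (List (Int × Int))) _ =>
        (st.1.drop 1 ++ st.1.take 1, st.2 ++ [PySem.List.enumerate st.1]))
      (base, acc)).2
    = acc ++ (List.range l.length).map (fun t => PySem.List.enumerate (pvRot^[t] base)) := by
  induction l generalizing base acc with
  | nil => simp
  | cons x xs ih =>
    simp only [List.foldl_cons, ih, List.length_cons, List.range_succ_eq_map,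
      List.map_cons, List.map_map]
    simp [Function.comp_def, Function.iterate_succ_apply, pvRot, List.append_assoc]

-- the rotated buffer after t steps, for t ≤ n
theorem pv_rot_range (n : Int) (t : Nat) (ht : (t : Int) ≤ n) :
    pvRot^[t] (PySem.List.pyRange 0 n 1)
      = PySem.List.pyRange (t : Int) n 1 ++ PySem.List.pyRange 0 (t : Int) 1 := by
  induction t with
  | zero => simp [PySem.List.pyRange_one_eq_nil (le_refl (0 : Int))]
  | succ t ih =>
    have htn : (t : Int) < n := by push_cast at ht ⊢; omega
    have ht' : (t : Int) ≤ n := le_of_lt htn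
    rw [Function.iterate_succ_apply', ih ht']
    rw [PySem.List.pyRange_one_cons htn]
    have h0t : (0 : Int) ≤ (t : Int) := by positivity
    simp only [pvRot, List.drop_succ_cons, List.drop_zero, List.take_succ_cons,
      List.take_zero, List.cons_append, List.append_assoc]
    rw [← PySem.List.pyRange_one_succ_right h0t]
    push_cast
    simp

-- A's row i equals enumerate of the i-times rotated buffer
theorem pv_row_eq (n : Int) (t : Nat) (ht : (t : Int) < n) :
    PySem.List.enumerate (pvRot^[t] (PySem.List.pyRange 0 n 1))
      = (PySem.List.pyRange 0 n 1).map
          (fun j => (j, if j + (t : Int) ≥ n then j + (t : Int) - n else j + (t : Int))) := by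
  rw [pv_rot_range n t (le_of_lt ht)]
  apply List.ext_getElem
  · simp [PySem.List.length_enumerate, PySem.List.length_pyRange_one]
    omega
  · intro k h1 h2
    have hk : k < n.toNat := by
      simpa [PySem.List.length_pyRange_one] using h2
    have hlen : (PySem.List.pyRange (t : Int) n 1).length = (n - t).toNat := by
      simp [PySem.List.length_pyRange_one]
    rw [PySem.List.getElem_enumerate, List.getElem_map]
    by_cases hc : k < (PySem.List.pyRange (t : Int) n 1).length
    · rw [List.getElem_append_left hc]
      simp only [PySem.List.getElem_pyRange_one]
      rw [hlen] at hc
      rw [if_neg (by omega : ¬ ((0 : Int) + k + (t : Int) ≥ n))]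
      simp only [Prod.mk.injEq]
      exact ⟨trivial, by omega⟩
    · rw [List.getElem_append_right (le_of_not_gt hc)]
      simp only [PySem.List.getElem_pyRange_one]
      rw [hlen] at hc ⊢
      rw [if_pos (by omega : ((0 : Int) + k + (t : Int) ≥ n))]
      simp only [Prod.mk.injEq]
      exact ⟨trivial, by omega⟩

-- ===== VERDICT (by name: the statement is the Claim_ definition above) =====
theorem get_cross_iteration_pattern_spec : Claim_equal_get_cross_iteration_pattern := by
  intro n _
  unfold Spec_get_cross_iteration_pattern get_cross_iteration_pattern get_cross_iteration_pattern_alt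
  rw [pv_bfold]
  simp only [PySem.List.foldl_append_singleton_eq_map, List.nil_append,
    PySem.List.length_pyRange_one]
  have hR : ∀ t ∈ List.range (n - 0).toNat,
      PySem.List.enumerate (pvRot^[t] (PySem.List.pyRange 0 n 1))
        = (PySem.List.pyRange 0 n 1).map
            (fun j => (j, if j + (t : Int) ≥ n then j + (t : Int) - n else j + (t : Int))) := by
    intro t htmem
    rw [List.mem_range] at htmem
    exact pv_row_eq n t (by omega)
  rw [List.map_congr_left hR]
  rw [PySem.List.pyRange_one 0 n]
  simp only [List.map_map]
  apply List.map_congr_left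
  intro t _
  simp [Function.comp_def]
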